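-- pv_equiv track=rewrite | github.com/jeongminllee/ProgrammersCodeTest | 프로그래머스/unrated/181837. 커피 심부름/커피 심부름.py | solution
-- ===== SOURCE A (Python) =====
-- def solution(order):
--     answer = 0
--     order_dict = {"americano" : 4500, "cafelatte" : 5000}
--     for i in order :
--         if "ice" in i :
--             i = i.replace("ice", "")
--         if "hot" in i :
--             i = i.replace("hot", "")
--         if "anything" in i :
--             i = i.replace("anything", "americano")
--
--         if i in order_dict :
--             answer += order_dict[i]
--     return answer
-- ===== SOURCE B (Python) =====
-- def _normalize(i):
--     if "ice" in i:
--         i = i.replace("ice", "")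
--     if "hot" in i:
--         i = i.replace("hot", "")
--     if "anything" in i:
--         i = i.replace("anything", "americano")
--     return i
--
--
-- def solution(order):
--     order_dict = {"americano": 4500, "cafelatte": 5000}
--     counts = {}
--     for i in order:
--         n = _normalize(i)
--         counts[n] = counts.get(n, 0) + 1
--     return sum(counts.get(name, 0) * price for name, price in order_dict.items())
-- ===== Notes on version B (the rewrite author's own statement) =====
-- stated objective: alternative
-- what changed: B builds a frequency table of the normalized order names in one pass and then scores by iterating over the price dict (count * price), instead of A's running sum with a dict membership test per order.
import Mathlib
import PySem

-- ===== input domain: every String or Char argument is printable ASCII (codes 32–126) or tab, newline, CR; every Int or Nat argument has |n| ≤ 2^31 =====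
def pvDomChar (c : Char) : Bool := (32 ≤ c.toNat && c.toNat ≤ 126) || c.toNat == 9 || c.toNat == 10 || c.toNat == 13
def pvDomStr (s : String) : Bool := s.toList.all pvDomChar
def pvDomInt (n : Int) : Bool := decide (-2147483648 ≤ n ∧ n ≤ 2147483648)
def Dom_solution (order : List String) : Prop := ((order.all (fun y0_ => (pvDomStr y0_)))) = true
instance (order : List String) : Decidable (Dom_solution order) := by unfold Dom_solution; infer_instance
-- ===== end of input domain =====

-- B counts normalized order names into a frequency dict and scores by iterating
-- over the price table (count * price), instead of A's per-order running sum.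


-- ===== PORT A =====
def solution (order : List String) : Int :=
  let order_dict : PySem.Dict String Int :=
    PySem.Dict.ofList [("americano", 4500), ("cafelatte", 5000)]
  order.foldl (fun answer i =>
    let i := if PySem.Str.isIn "ice" i then PySem.Str.replace i "ice" "" else i
    let i := if PySem.Str.isIn "hot" i then PySem.Str.replace i "hot" "" else i
    let i := if PySem.Str.isIn "anything" i then PySem.Str.replace i "anything" "americano" else i
    if order_dict.contains i then answer + order_dict.getD i 0 else answer) 0

-- ===== PORT B =====
def normalizeOrder (i : String) : String :=
  let i := if PySem.Str.isIn "ice" i then PySem.Str.replace i "ice" "" else i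
  let i := if PySem.Str.isIn "hot" i then PySem.Str.replace i "hot" "" else i
  if PySem.Str.isIn "anything" i then PySem.Str.replace i "anything" "americano" else i

def solution_alt (order : List String) : Int :=
  let order_dict : PySem.Dict String Int :=
    PySem.Dict.ofList [("americano", 4500), ("cafelatte", 5000)]
  let counts : PySem.Dict String Int :=
    order.foldl (fun d i =>
      let n := normalizeOrder i
      d.insert n (d.getD n 0 + 1)) PySem.Dict.empty
  order_dict.items.foldl (fun acc p => acc + counts.getD p.1 0 * p.2) 0

-- ===== PRECONDITION & SPEC =====
def Spec_solution (order : List String) (out : Int) : Prop := out = solution_alt order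
instance (order : List String) (out : Int) : Decidable (Spec_solution order out) := by unfold Spec_solution; infer_instance

-- ===== CLAIM (what is proved, stated in full; the proofs are below) =====
def Claim_equal_solution : Prop := ∀ (order : List String), Dom_solution order → Spec_solution order (solution order)

-- ===== LEMMAS AND PROOFS =====

-- the literal price dict
def pvOD : PySem.Dict String Int := PySem.Dict.ofList [("americano", 4500), ("cafelatte", 5000)]

-- A's loop body, via the shared normalization (defeq: same let-chain)
def pvAStep (answer : Int) (i : String) : Int :=
  if pvOD.contains (normalizeOrder i) then answer + pvOD.getD (normalizeOrder i) 0 else answer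

theorem pvContains_false (x : String) (h1 : x ≠ "americano") (h2 : x ≠ "cafelatte") :
    pvOD.contains x = false := by
  have : pvOD = PySem.Dict.mk [("americano", 4500), ("cafelatte", 5000)] := rfl
  rw [this, PySem.Dict.contains_mk]
  simp [h1.symm, h2.symm]

-- one A-loop step, expressed through 0/1 indicators of the two known names
theorem pvStep (acc : Int) (x : String) :
    pvAStep acc x
      = acc + 4500 * (if normalizeOrder x = "americano" then 1 else 0)
            + 5000 * (if normalizeOrder x = "cafelatte" then 1 else 0) := by
  unfold pvAStep
  by_cases h1 : normalizeOrder x = "americano"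
  · rw [h1]
    have hc : pvOD.contains "americano" = true := by decide
    have hg : pvOD.getD "americano" 0 = 4500 := by decide
    have hne : ("americano" : String) ≠ "cafelatte" := by decide
    simp [hc, hg, hne]
  · by_cases h2 : normalizeOrder x = "cafelatte"
    · rw [h2]
      have hc : pvOD.contains "cafelatte" = true := by decide
      have hg : pvOD.getD "cafelatte" 0 = 5000 := by decide
      have hne : ("cafelatte" : String) ≠ "americano" := by decide
      simp [hc, hg, hne]
    · rw [pvContains_false _ h1 h2]
      simp [h1, h2]

theorem pvLoopA (l : List String) (acc : Int) :
    l.foldl pvAStep acc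
      = acc + 4500 * ((l.map normalizeOrder).count "americano" : Int)
            + 5000 * ((l.map normalizeOrder).count "cafelatte" : Int) := by
  induction l generalizing acc with
  | nil => simp
  | cons x xs ih =>
      rw [List.foldl_cons, ih, pvStep]
      simp only [List.map_cons, List.count_cons]
      by_cases h1 : normalizeOrder x = "americano" <;>
        by_cases h2 : normalizeOrder x = "cafelatte" <;>
          simp [h1, h2] <;> ring

theorem solution_eq (order : List String) :
    solution order
      = 4500 * ((order.map normalizeOrder).count "americano" : Int)
      + 5000 * ((order.map normalizeOrder).count "cafelatte" : Int) := by
  have : solution order = order.foldl pvAStep 0 := rfl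
  rw [this, pvLoopA]; ring

theorem solution_alt_eq (order : List String) :
    solution_alt order
      = ((order.map normalizeOrder).count "americano" : Int) * 4500
      + ((order.map normalizeOrder).count "cafelatte" : Int) * 5000 := by
  have hz : solution_alt order
      = (PySem.Dict.ofList [("americano", (4500:Int)), ("cafelatte", 5000)]).items.foldl
          (fun acc p => acc
            + (order.foldl (fun d i =>
                d.insert (normalizeOrder i) (d.getD (normalizeOrder i) 0 + 1))
                PySem.Dict.empty).getD p.1 0 * p.2) 0 := rfl
  have hitems : (PySem.Dict.ofList [("americano", (4500:Int)), ("cafelatte", 5000)]).items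
      = [("americano", (4500:Int)), ("cafelatte", 5000)] := by decide
  have hmap : (order.foldl (fun d i =>
        d.insert (normalizeOrder i) (d.getD (normalizeOrder i) 0 + 1))
        (PySem.Dict.empty : PySem.Dict String Int))
      = (order.map normalizeOrder).foldl (fun d x => d.insert x (d.getD x 0 + 1))
          PySem.Dict.empty := by rw [List.foldl_map]
  rw [hz, hitems]
  simp only [List.foldl_cons, List.foldl_nil]
  rw [hmap]
  simp only [PySem.Dict.getD_foldl_insert_add_one, PySem.Dict.getD_empty]
  ring

-- ===== VERDICT (by name: the statement is the Claim_ definition above) =====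
theorem solution_spec : Claim_equal_solution := by
  intro order _
  unfold Spec_solution
  rw [solution_eq, solution_alt_eq]; ring
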